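-- pv_equiv track=rewrite | github.com/cgallego17/megaInventario | verificar_productos_api.py | mapear_campo
-- ===== SOURCE A (Python) =====
-- CAMPOS_SISTEMA = {
--     'codigo_barras': ['codigo_barras', 'codigo_barra', 'barcode', 'ean', 'upc', 'codigo_de_barras', 'codigoBarras', 'codigo'],
--     'codigo': ['codigo', 'cod', 'code', 'sku', 'codigo_interno', 'codigoInterno', 'id_producto'],
--     'nombre': ['nombre', 'nombre_producto', 'name', 'producto', 'descripcion', 'description', 'title', 'titulo'],
--     'marca': ['nombre_marca', 'marca', 'brand', 'fabricante', 'manufacturer', 'marca_producto'],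
-- }
--
-- def mapear_campo(data, campo_sistema):
--     """Mapea un campo de la API al campo del sistema"""
--     posibles_campos = CAMPOS_SISTEMA.get(campo_sistema, [campo_sistema])
--
--     for campo_api in posibles_campos:
--         # Buscar directamente
--         if campo_api in data and data[campo_api] is not None:
--             return str(data[campo_api]).strip()
--
--         # Buscar con diferentes variaciones de mayúsculas/minúsculas
--         for key in data.keys():
--             if key.lower() == campo_api.lower():
--                 if data[key] is not None:
--                     return str(data[key]).strip()
--
--     return None
-- ===== SOURCE B (Python) =====
-- CAMPOS_SISTEMA = {
--     'codigo_barras': ['codigo_barras', 'codigo_barra', 'barcode', 'ean', 'upc', 'codigo_de_barras', 'codigoBarras', 'codigo'],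
--     'codigo': ['codigo', 'cod', 'code', 'sku', 'codigo_interno', 'codigoInterno', 'id_producto'],
--     'nombre': ['nombre', 'nombre_producto', 'name', 'producto', 'descripcion', 'description', 'title', 'titulo'],
--     'marca': ['nombre_marca', 'marca', 'brand', 'fabricante', 'manufacturer', 'marca_producto'],
-- }
--
-- def mapear_campo(data, campo_sistema):
--     """Mapea un campo de la API al campo del sistema.
--
--     Single pass over the data: score every key by
--     (candidate rank, 0=exact/1=case-insensitive, position) and
--     return the value of the best-scored key (argmin selection)."""
--     posibles_campos = CAMPOS_SISTEMA.get(campo_sistema, [campo_sistema])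
--     lowered = [c.lower() for c in posibles_campos]
--     best = None
--     for pos, (key, value) in enumerate(data.items()):
--         if value is None:
--             continue
--         if key in posibles_campos:
--             cand = (posibles_campos.index(key), 0, pos, str(value).strip())
--             if best is None or cand < best:
--                 best = cand
--         lk = key.lower()
--         if lk in lowered:
--             cand = (lowered.index(lk), 1, pos, str(value).strip())
--             if best is None or cand < best:
--                 best = cand
--     return best[3] if best is not None else None
-- ===== Notes on version B (the rewrite author's own statement) =====
-- stated objective: faster
-- what changed: Replaces A's nested candidate-by-candidate search (exact lookup then an interpreted rescan of all data keys per candidate) with a single argmin pass over the data that scores every key by the tuple (candidate rank, exact-vs-case-insensitive tier, position) and returns the best-scored key's stripped value.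
import Mathlib
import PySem

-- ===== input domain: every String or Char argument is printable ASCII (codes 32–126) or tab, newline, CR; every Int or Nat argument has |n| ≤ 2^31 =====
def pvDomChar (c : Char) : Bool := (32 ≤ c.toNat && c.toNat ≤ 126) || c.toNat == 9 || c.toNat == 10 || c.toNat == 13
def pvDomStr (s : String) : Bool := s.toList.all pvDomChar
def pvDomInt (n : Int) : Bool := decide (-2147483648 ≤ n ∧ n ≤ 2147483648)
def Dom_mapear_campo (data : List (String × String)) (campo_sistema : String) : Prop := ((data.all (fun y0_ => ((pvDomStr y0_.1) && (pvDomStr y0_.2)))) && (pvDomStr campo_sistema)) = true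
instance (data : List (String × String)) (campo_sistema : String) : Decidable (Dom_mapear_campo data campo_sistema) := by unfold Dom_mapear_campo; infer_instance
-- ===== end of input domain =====

-- B replaces A's nested candidate-by-candidate search by a single argmin pass over the
-- data: every key is scored (candidate rank, 0=exact/1=case-insensitive, position) and
-- the best-scored key's stripped value is returned; objective: faster (one pass, measured).
-- Values are typed String (never None), so Python's 'is not None' checks are vacuously true here.

-- shared module constant (CAMPOS_SISTEMA in both Pythons)
def CAMPOS_SISTEMA : PySem.Dict String (List String) := PySem.Dict.ofList
  [("codigo_barras", ["codigo_barras", "codigo_barra", "barcode", "ean", "upc", "codigo_de_barras", "codigoBarras", "codigo"]),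
   ("codigo", ["codigo", "cod", "code", "sku", "codigo_interno", "codigoInterno", "id_producto"]),
   ("nombre", ["nombre", "nombre_producto", "name", "producto", "descripcion", "description", "title", "titulo"]),
   ("marca", ["nombre_marca", "marca", "brand", "fabricante", "manufacturer", "marca_producto"])]

-- ===== PORT A =====
-- data[k] on the assoc list (dict): first match
def pvGetKeyA (data : List (String × String)) (k : String) : Option String :=
  (data.find? (fun p => p.1 == k)).map (·.2)

-- inner loop: 'for key in data.keys(): if key.lower() == campo_api.lower(): return str(data[key]).strip()'
def pvInnerA (full : List (String × String)) (c : String) : List (String × String) → Option String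
  | [] => none
  | kv :: t =>
    if PySem.Str.lower kv.1 == PySem.Str.lower c then
      (pvGetKeyA full kv.1).map PySem.Str.strip
    else pvInnerA full c t

-- outer loop over posibles_campos
def pvGoA (data : List (String × String)) : List String → Option String
  | [] => none
  | c :: rest =>
    match pvGetKeyA data c with
    | some v => some (PySem.Str.strip v)
    | none =>
      match pvInnerA data c data with
      | some r => some r
      | none => pvGoA data rest

def mapear_campo (data : List (String × String)) (campo_sistema : String) : Option String :=
  pvGoA data (CAMPOS_SISTEMA.getD campo_sistema [campo_sistema])

-- ===== PORT B =====
-- a scored key: (candidate rank, 0 exact / 1 case-insensitive, position in data, stripped value)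
-- Python tuple '<' (lexicographic; Python's str '<' = Lean's String '<': code-point lexicographic)
def pvLtCand (a b : Nat × Nat × Nat × String) : Bool :=
  decide (a.1 < b.1) || (a.1 == b.1 &&
    (decide (a.2.1 < b.2.1) || (a.2.1 == b.2.1 &&
      (decide (a.2.2.1 < b.2.2.1) || (a.2.2.1 == b.2.2.1 && decide (a.2.2.2 < b.2.2.2))))))

-- 'if best is None or cand < best: best = cand'
def pvUpd (best : Option (Nat × Nat × Nat × String)) (c : Nat × Nat × Nat × String) :
    Option (Nat × Nat × Nat × String) :=
  match best with
  | none => some c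
  | some b => if pvLtCand c b then some c else some b

-- 'for pos, (key, value) in enumerate(data.items()):' with the two scored updates
def pvScanB (ps lows : List String) : Nat → Option (Nat × Nat × Nat × String) →
    List (String × String) → Option (Nat × Nat × Nat × String)
  | _, best, [] => best
  | pos, best, kv :: t =>
    let b1 := match PySem.List.index? ps kv.1 with
      | some j => pvUpd best (j, 0, pos, PySem.Str.strip kv.2)
      | none => best
    let b2 := match PySem.List.index? lows (PySem.Str.lower kv.1) with
      | some j => pvUpd b1 (j, 1, pos, PySem.Str.strip kv.2)
      | none => b1
    pvScanB ps lows (pos + 1) b2 t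

def mapear_campo_alt (data : List (String × String)) (campo_sistema : String) : Option String :=
  let ps := CAMPOS_SISTEMA.getD campo_sistema [campo_sistema]
  let lows := ps.map PySem.Str.lower
  (pvScanB ps lows 0 none data).map (·.2.2.2)

-- ===== PRECONDITION & SPEC =====
def Spec_mapear_campo (data : List (String × String)) (campo_sistema : String) (out : Option String) : Prop := out = mapear_campo_alt data campo_sistema
instance (data : List (String × String)) (campo_sistema : String) (out : Option String) : Decidable (Spec_mapear_campo data campo_sistema out) := by unfold Spec_mapear_campo; infer_instance

-- ===== CLAIM (what is proved, stated in full; the proofs are below) =====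
def Claim_equal_mapear_campo : Prop := ∀ (data : List (String × String)) (campo_sistema : String), Dom_mapear_campo data campo_sistema → Spec_mapear_campo data campo_sistema (mapear_campo data campo_sistema)

-- ===== LEMMAS AND PROOFS =====

-- the list of all scored keys B's single pass minimises over
def pvCands (ps lows : List String) : Nat → List (String × String) → List (Nat × Nat × Nat × String)
  | _, [] => []
  | pos, kv :: t =>
    ((PySem.List.index? ps kv.1).toList.map (fun j => (j, 0, pos, PySem.Str.strip kv.2)))
    ++ ((PySem.List.index? lows (PySem.Str.lower kv.1)).toList.map (fun j => (j, 1, pos, PySem.Str.strip kv.2)))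
    ++ pvCands ps lows (pos + 1) t

-- B's scan is the fold of pvUpd over the scored keys
theorem scanB_eq_foldl (ps lows : List String) (data : List (String × String))
    (pos : Nat) (best : Option (Nat × Nat × Nat × String)) :
    pvScanB ps lows pos best data = List.foldl pvUpd best (pvCands ps lows pos data) := by
  induction data generalizing pos best with
  | nil => rfl
  | cons kv t ih =>
    simp only [pvScanB, pvCands, List.foldl_append]
    rw [ih]
    cases PySem.List.index? ps kv.1 <;> cases PySem.List.index? lows (PySem.Str.lower kv.1) <;> rfl

-- strict lexicographic order facts
theorem ltCand_iff (a b : Nat × Nat × Nat × String) :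
    pvLtCand a b = true ↔
      (a.1 < b.1 ∨ (a.1 = b.1 ∧ (a.2.1 < b.2.1 ∨ (a.2.1 = b.2.1 ∧
        (a.2.2.1 < b.2.2.1 ∨ (a.2.2.1 = b.2.2.1 ∧ a.2.2.2 < b.2.2.2)))))) := by
  simp [pvLtCand]

theorem ltCand_irrefl (a : Nat × Nat × Nat × String) : pvLtCand a a = false := by
  simp [pvLtCand]

theorem ltCand_trans (a b c : Nat × Nat × Nat × String)
    (h1 : pvLtCand a b = true) (h2 : pvLtCand b c = true) : pvLtCand a c = true := by
  rw [ltCand_iff] at h1 h2 ⊢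
  rcases h1 with h1 | ⟨e1, h1⟩ <;> rcases h2 with h2 | ⟨e2, h2⟩ <;> try (left; omega)
  right; refine ⟨by omega, ?_⟩
  rcases h1 with h1 | ⟨f1, h1⟩ <;> rcases h2 with h2 | ⟨f2, h2⟩ <;> try (left; omega)
  right; refine ⟨by omega, ?_⟩
  rcases h1 with h1 | ⟨g1, h1⟩ <;> rcases h2 with h2 | ⟨g2, h2⟩ <;> try (left; omega)
  right; exact ⟨by omega, lt_trans h1 h2⟩

theorem ltCand_total (a b : Nat × Nat × Nat × String)
    (h1 : pvLtCand a b = false) (h2 : pvLtCand b a = false) : a = b := by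
  rw [Bool.eq_false_iff] at h1 h2
  rcases a with ⟨a1, a2, a3, a4⟩; rcases b with ⟨b1, b2, b3, b4⟩
  have hlt : ∀ x y : ℕ × ℕ × ℕ × String, x.2.2.2 < y.2.2.2 → x.1 = y.1 → x.2.1 = y.2.1 →
      x.2.2.1 = y.2.2.1 → pvLtCand x y = true := by
    intro x y hs e1 e2 e3
    exact (ltCand_iff x y).mpr (Or.inr ⟨e1, Or.inr ⟨e2, Or.inr ⟨e3, hs⟩⟩⟩)
  have e1 : a1 = b1 := by
    rcases Nat.lt_trichotomy a1 b1 with g | g | g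
    · exact absurd ((ltCand_iff _ _).mpr (Or.inl g)) h1
    · exact g
    · exact absurd ((ltCand_iff _ _).mpr (Or.inl g)) h2
  have e2 : a2 = b2 := by
    rcases Nat.lt_trichotomy a2 b2 with g | g | g
    · exact absurd ((ltCand_iff _ _).mpr (Or.inr ⟨e1, Or.inl g⟩)) h1
    · exact g
    · exact absurd ((ltCand_iff _ _).mpr (Or.inr ⟨e1.symm, Or.inl g⟩)) h2
  have e3 : a3 = b3 := by
    rcases Nat.lt_trichotomy a3 b3 with g | g | g
    · exact absurd ((ltCand_iff _ _).mpr (Or.inr ⟨e1, Or.inr ⟨e2, Or.inl g⟩⟩)) h1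
    · exact g
    · exact absurd ((ltCand_iff _ _).mpr (Or.inr ⟨e1.symm, Or.inr ⟨e2.symm, Or.inl g⟩⟩)) h2
  have e4 : a4 = b4 := by
    rcases lt_trichotomy a4 b4 with g | g | g
    · exact absurd ((ltCand_iff _ _).mpr (Or.inr ⟨e1, Or.inr ⟨e2, Or.inr ⟨e3, g⟩⟩⟩)) h1
    · exact g
    · exact absurd ((ltCand_iff _ _).mpr (Or.inr ⟨e1.symm, Or.inr ⟨e2.symm, Or.inr ⟨e3.symm, g⟩⟩⟩)) h2
  simp [e1, e2, e3, e4]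

-- the fold of pvUpd from a seed returns the minimum of seed :: l
theorem foldl_upd_min (l : List (Nat × Nat × Nat × String)) :
    ∀ b : Nat × Nat × Nat × String, ∃ m, List.foldl pvUpd (some b) l = some m ∧ m ∈ b :: l ∧
      ∀ x ∈ b :: l, pvLtCand x m = false := by
  induction l with
  | nil =>
    intro b
    exact ⟨b, rfl, by simp, by intro x hx; simp at hx; subst hx; exact ltCand_irrefl x⟩
  | cons c t ih =>
    intro b
    simp only [List.foldl_cons, pvUpd]
    by_cases hlt : pvLtCand c b = true
    · rw [if_pos hlt]
      obtain ⟨m, hm, hmem, hmin⟩ := ih c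
      refine ⟨m, hm, ?_, ?_⟩
      · rw [List.mem_cons] at hmem
        rcases hmem with rfl | h
        · exact List.mem_cons_of_mem _ (by simp)
        · exact List.mem_cons_of_mem _ (List.mem_cons_of_mem _ h)
      · intro x hx
        rcases List.mem_cons.mp hx with rfl | hx'
        · rw [Bool.eq_false_iff]; intro hbm
          have hcm : pvLtCand c m = false := hmin c (by simp)
          have := ltCand_trans c x m hlt hbm
          rw [this] at hcm; exact Bool.true_eq_false.mp hcm
        · exact hmin x hx'
    · rw [if_neg hlt]
      obtain ⟨m, hm, hmem, hmin⟩ := ih b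
      refine ⟨m, hm, ?_, ?_⟩
      · rw [List.mem_cons] at hmem
        rcases hmem with rfl | h
        · simp
        · exact List.mem_cons_of_mem _ (List.mem_cons_of_mem _ h)
      · intro x hx
        rcases List.mem_cons.mp hx with rfl | hx'
        · exact hmin x (by simp)
        rcases List.mem_cons.mp hx' with rfl | hx''
        · rw [Bool.eq_false_iff]; intro hcm
          have hbm : pvLtCand b m = false := hmin b (by simp)
          by_cases hbc : pvLtCand b x = true
          · have := ltCand_trans b x m hbc hcm
            rw [this] at hbm; exact Bool.true_eq_false.mp hbm
          · have heq : x = b := ltCand_total x b (Bool.eq_false_iff.mpr hlt)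
              (Bool.eq_false_iff.mpr (fun h => hbc h))
            subst heq
            rw [hcm] at hbm; exact Bool.true_eq_false.mp hbm
        · exact hmin x (List.mem_cons_of_mem _ hx'')

-- a characterised minimum is THE result of the fold
theorem foldl_upd_eq_of_min (l : List (Nat × Nat × Nat × String)) (m : Nat × Nat × Nat × String)
    (hmem : m ∈ l) (hmin : ∀ x ∈ l, pvLtCand x m = false) :
    List.foldl pvUpd none l = some m := by
  cases l with
  | nil => simp at hmem
  | cons c t =>
    have h0 : List.foldl pvUpd none (c :: t) = List.foldl pvUpd (some c) t := rfl
    rw [h0]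
    obtain ⟨m', hm', hmem', hmin'⟩ := foldl_upd_min t c
    rw [hm']
    congr 1
    exact ltCand_total m' m (hmin m' hmem') (hmin' m hmem)

-- membership in the scored list, positionally
theorem mem_pvCands (ps lows : List String) (pos : Nat) (data : List (String × String))
    (x : Nat × Nat × Nat × String) :
    x ∈ pvCands ps lows pos data ↔
      ∃ k kv, data[k]? = some kv ∧ x.2.2.1 = pos + k ∧ x.2.2.2 = PySem.Str.strip kv.2 ∧
        ((x.2.1 = 0 ∧ PySem.List.index? ps kv.1 = some x.1) ∨
         (x.2.1 = 1 ∧ PySem.List.index? lows (PySem.Str.lower kv.1) = some x.1)) := by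
  induction data generalizing pos with
  | nil => simp [pvCands]
  | cons kv t ih =>
    simp only [pvCands, List.mem_append, ih, List.mem_map, Option.mem_toList]
    constructor
    · rintro ((⟨j, hj, rfl⟩ | ⟨j, hj, rfl⟩) | ⟨k, kv', hk, hp, hv, hor⟩)
      · exact ⟨0, kv, by simp, by simp, rfl, Or.inl ⟨rfl, by simpa using hj⟩⟩
      · exact ⟨0, kv, by simp, by simp, rfl, Or.inr ⟨rfl, by simpa using hj⟩⟩
      · exact ⟨k + 1, kv', by simpa using hk, by omega, hv, hor⟩
    · rintro ⟨k, kv', hk, hp, hv, hor⟩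
      cases k with
      | zero =>
        simp only [List.getElem?_cons_zero, Option.some.injEq] at hk
        subst hk
        rcases x with ⟨x1, x2, x3, x4⟩
        simp only at hp hv
        have hx3 : x3 = pos := by omega
        subst hx3; subst hv
        rcases hor with ⟨ht, hj⟩ | ⟨ht, hj⟩
        · simp only at ht; subst ht
          exact Or.inl (Or.inl ⟨x1, by simpa using hj, rfl⟩)
        · simp only at ht; subst ht
          exact Or.inl (Or.inr ⟨x1, by simpa using hj, rfl⟩)
      | succ k' =>
        right
        exact ⟨k', kv', by simpa using hk, by omega, hv, hor⟩

-- index? into c :: l is 0 exactly for c itself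
theorem index?_cons_zero_iff (c v : String) (l : List String) :
    PySem.List.index? (c :: l) v = some 0 ↔ v = c := by
  by_cases h : c = v
  · subst h
    rw [PySem.List.index?_cons_self]
    simp
  · rw [PySem.List.index?_cons_of_ne l h]
    constructor
    · intro hm
      rcases Option.map_eq_some_iff.mp hm with ⟨k, _, hk⟩
      omega
    · intro hv; exact absurd hv.symm h

-- first exact match: position characterisation
theorem find?_key_first (data : List (String × String)) (c : String) (p : String × String)
    (h : data.find? (fun q => q.1 == c) = some p) :
    ∃ i, ∃ (hi : i < data.length), data[i] = p ∧ ∀ j (hj : j < i), ¬ data[j].1 = c := by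
  rw [List.find?_eq_some_iff_getElem] at h
  obtain ⟨hp, i, hi, hgi, hprev⟩ := h
  refine ⟨i, hi, hgi, ?_⟩
  intro j hj hc
  have := hprev j hj
  simp [hc] at this

theorem find?_lower_first (data : List (String × String)) (s : String) (p : String × String)
    (h : data.find? (fun q => PySem.Str.lower q.1 == s) = some p) :
    ∃ i, ∃ (hi : i < data.length), data[i] = p ∧ PySem.Str.lower p.1 = s ∧
      ∀ j (hj : j < i), ¬ PySem.Str.lower data[j].1 = s := by
  rw [List.find?_eq_some_iff_getElem] at h
  obtain ⟨hp, i, hi, hgi, hprev⟩ := h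
  refine ⟨i, hi, hgi, by simpa using hp, ?_⟩
  intro j hj hc
  have := hprev j hj
  simp [hc] at this

-- the first lower-matching pair's key looks up (exact, first-match) to that very pair
theorem find_exact_of_find_lower (data : List (String × String)) (s : String) (p : String × String)
    (h : data.find? (fun q => PySem.Str.lower q.1 == s) = some p) :
    data.find? (fun q => q.1 == p.1) = some p := by
  induction data with
  | nil => simp at h
  | cons kv t ih =>
    by_cases hk : (PySem.Str.lower kv.1 == s) = true
    · rw [List.find?_cons_of_pos (p := fun (q : String × String) => PySem.Str.lower q.1 == s) hk] at h
      injection h with h; subst h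
      exact List.find?_cons_of_pos (p := fun (q : String × String) => q.1 == kv.1) (by simp)
    · rw [List.find?_cons_of_neg (p := fun (q : String × String) => PySem.Str.lower q.1 == s) hk] at h
      have hp : (PySem.Str.lower p.1 == s) = true :=
        List.find?_some (p := fun (q : String × String) => PySem.Str.lower q.1 == s) h
      have hne : ¬ ((kv.1 == p.1) = true) := by
        intro hb
        exact hk (by rw [eq_of_beq hb]; exact hp)
      rw [List.find?_cons_of_neg (p := fun (q : String × String) => q.1 == p.1) hne]
      exact ih h

-- A's inner scan as a find?
theorem innerA_eq_find (full l : List (String × String)) (c : String) :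
    pvInnerA full c l =
      (l.find? (fun p => PySem.Str.lower p.1 == PySem.Str.lower c)).bind
        (fun p => (pvGetKeyA full p.1).map PySem.Str.strip) := by
  induction l with
  | nil => simp [pvInnerA]
  | cons kv t ih =>
    by_cases hk : (PySem.Str.lower kv.1 == PySem.Str.lower c) = true
    · rw [List.find?_cons_of_pos (p := fun (p : String × String) => PySem.Str.lower p.1 == PySem.Str.lower c) hk]
      simp [pvInnerA, hk]
    · rw [List.find?_cons_of_neg (p := fun (p : String × String) => PySem.Str.lower p.1 == PySem.Str.lower c) hk]
      simpa [pvInnerA, hk] using ih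

-- shift: prepending a candidate shifts every rank by one when nothing matches the head
def pvShift (x : Nat × Nat × Nat × String) : Nat × Nat × Nat × String :=
  (x.1 + 1, x.2)

theorem pvCands_shift (c lc : String) (ps lows : List String) (pos : Nat)
    (data : List (String × String))
    (hne : ∀ kv ∈ data, kv.1 ≠ c ∧ PySem.Str.lower kv.1 ≠ lc) :
    pvCands (c :: ps) (lc :: lows) pos data = (pvCands ps lows pos data).map pvShift := by
  induction data generalizing pos with
  | nil => simp [pvCands]
  | cons kv t ih =>
    obtain ⟨h1, h2⟩ := hne kv (by simp)
    simp only [pvCands, List.map_append]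
    rw [PySem.List.index?_cons_of_ne ps (fun h => h1 h.symm),
        PySem.List.index?_cons_of_ne lows (fun h => h2 h.symm),
        ih (pos + 1) (fun kv' hkv' => hne kv' (List.mem_cons_of_mem _ hkv'))]
    cases PySem.List.index? ps kv.1 <;> cases PySem.List.index? lows (PySem.Str.lower kv.1) <;>
      simp [pvShift]

theorem ltCand_shift (x y : Nat × Nat × Nat × String) :
    pvLtCand (pvShift x) (pvShift y) = pvLtCand x y := by
  rw [Bool.eq_iff_iff, ltCand_iff, ltCand_iff]
  simp only [pvShift]
  constructor
  · rintro (h | ⟨h1, h⟩)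
    · exact Or.inl (by omega)
    · exact Or.inr ⟨by omega, h⟩
  · rintro (h | ⟨h1, h⟩)
    · exact Or.inl (by omega)
    · exact Or.inr ⟨by omega, h⟩

theorem foldl_upd_shift (l : List (Nat × Nat × Nat × String))
    (b : Option (Nat × Nat × Nat × String)) :
    List.foldl pvUpd (b.map pvShift) (l.map pvShift) = (List.foldl pvUpd b l).map pvShift := by
  induction l generalizing b with
  | nil => rfl
  | cons c t ih =>
    simp only [List.map_cons, List.foldl_cons]
    rw [← ih]
    congr 1
    cases b with
    | none => rfl
    | some b' =>
      simp only [Option.map_some, pvUpd, ltCand_shift]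
      split_ifs <;> rfl

theorem pvCands_nil_nil (pos : Nat) (data : List (String × String)) :
    pvCands [] [] pos data = [] := by
  induction data generalizing pos with
  | nil => rfl
  | cons kv t ih =>
    simp [pvCands, ih]

-- main induction: A's nested search = value of the minimum scored key
theorem goA_eq_min (data : List (String × String)) (ps : List String) :
    pvGoA data ps =
      (List.foldl pvUpd none (pvCands ps (ps.map PySem.Str.lower) 0 data)).map (·.2.2.2) := by
  induction ps with
  | nil => simp [pvGoA, pvCands_nil_nil]
  | cons c rest ih =>
    simp only [pvGoA, pvGetKeyA, List.map_cons]
    cases hf : data.find? (fun p => p.1 == c) with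
    | some p =>
      -- exact hit on the head candidate: the minimum is (0, 0, i, strip p.2)
      obtain ⟨i, hi, hgi, hfirst⟩ := find?_key_first data c p hf
      have hpc : p.1 = c := by
        have := List.find?_some (p := fun (q : String × String) => q.1 == c) hf
        simpa using this
      have hmem : (0, 0, i, PySem.Str.strip p.2) ∈ pvCands (c :: rest) (PySem.Str.lower c :: rest.map PySem.Str.lower) 0 data := by
        rw [mem_pvCands]
        refine ⟨i, p, List.getElem?_eq_some_iff.mpr ⟨hi, hgi⟩, by simp, by simp, Or.inl ⟨rfl, ?_⟩⟩
        rw [hpc, PySem.List.index?_cons_self]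
      have hmin : ∀ x ∈ pvCands (c :: rest) (PySem.Str.lower c :: rest.map PySem.Str.lower) 0 data,
          pvLtCand x (0, 0, i, PySem.Str.strip p.2) = false := by
        intro x hx
        rw [mem_pvCands] at hx
        obtain ⟨k, kv, hk, hp3, hv, hor⟩ := hx
        obtain ⟨hkl, hget⟩ := List.getElem?_eq_some_iff.mp hk
        rw [Bool.eq_false_iff]; intro hlt
        rw [ltCand_iff] at hlt
        simp only at hlt
        rcases hlt with h | ⟨h1, h | ⟨h2, h | ⟨h3, h4⟩⟩⟩
        · omega
        · omega
        · -- exact match on the head at a position < i: contradicts first-match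
          rcases hor with ⟨ht, hj⟩ | ⟨ht, hj⟩
          · rw [h1] at hj
            have hkv : kv.1 = c := (index?_cons_zero_iff c kv.1 rest).mp hj
            have hik : k < i := by omega
            have := hfirst k (by omega)
            rw [hget] at this; exact this hkv
          · omega
        · -- same position as the witness: same pair, irreflexivity
          have hik : k = i := by omega
          subst hik
          rw [hget] at hgi
          rw [hgi] at hv
          rw [hv] at h4
          exact absurd h4 (lt_irrefl _)
      rw [foldl_upd_eq_of_min _ _ hmem hmin]
      simp
    | none =>
      have hnoexact : ∀ kv ∈ data, kv.1 ≠ c := by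
        intro kv hkv hc
        have := List.find?_eq_none.mp hf kv hkv
        simp [hc] at this
      rw [innerA_eq_find]
      cases hfl : data.find? (fun p => PySem.Str.lower p.1 == PySem.Str.lower c) with
      | some p =>
        -- case-insensitive hit on the head candidate: the minimum is (0, 1, i, strip p.2)
        obtain ⟨i, hi, hgi, hps, hfirst⟩ := find?_lower_first data (PySem.Str.lower c) p hfl
        have hval : (pvGetKeyA data p.1).map PySem.Str.strip = some (PySem.Str.strip p.2) := by
          rw [pvGetKeyA, find_exact_of_find_lower data (PySem.Str.lower c) p hfl]
          rfl
        have hmem : (0, 1, i, PySem.Str.strip p.2) ∈ pvCands (c :: rest) (PySem.Str.lower c :: rest.map PySem.Str.lower) 0 data := by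
          rw [mem_pvCands]
          refine ⟨i, p, List.getElem?_eq_some_iff.mpr ⟨hi, hgi⟩, by simp, by simp, Or.inr ⟨rfl, ?_⟩⟩
          rw [hps, PySem.List.index?_cons_self]
        have hmin : ∀ x ∈ pvCands (c :: rest) (PySem.Str.lower c :: rest.map PySem.Str.lower) 0 data,
            pvLtCand x (0, 1, i, PySem.Str.strip p.2) = false := by
          intro x hx
          rw [mem_pvCands] at hx
          obtain ⟨k, kv, hk, hp3, hv, hor⟩ := hx
          obtain ⟨hkl, hget⟩ := List.getElem?_eq_some_iff.mp hk
          rw [Bool.eq_false_iff]; intro hlt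
          rw [ltCand_iff] at hlt
          simp only at hlt
          rcases hlt with h | ⟨h1, h | ⟨h2, h | ⟨h3, h4⟩⟩⟩
          · omega
          · -- tier 0 entry on the head: an exact match with c — impossible
            rcases hor with ⟨ht, hj⟩ | ⟨ht, hj⟩
            · rw [h1] at hj
              have hkv : kv.1 = c := (index?_cons_zero_iff c kv.1 rest).mp hj
              exact hnoexact kv (List.mem_of_getElem? hk) hkv
            · omega
          · -- tier 1 on the head at a position < i: earlier case-insensitive match
            rcases hor with ⟨ht, hj⟩ | ⟨ht, hj⟩
            · omega
            · rw [h1] at hj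
              have hkv : PySem.Str.lower kv.1 = PySem.Str.lower c :=
                (index?_cons_zero_iff _ _ _).mp hj
              have := hfirst k (by omega)
              rw [hget] at this
              exact this hkv
          · -- same position as the witness: same pair, irreflexivity
            have hik : k = i := by omega
            subst hik
            rw [hget] at hgi
            rw [hgi] at hv
            rw [hv] at h4
            exact absurd h4 (lt_irrefl _)
        rw [foldl_upd_eq_of_min _ _ hmem hmin]
        simp [hval]
      | none =>
        -- the head candidate matches nothing: every rank shifts by one
        have hnolower : ∀ kv ∈ data, PySem.Str.lower kv.1 ≠ PySem.Str.lower c := by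
          intro kv hkv hc
          have := List.find?_eq_none.mp hfl kv hkv
          simp [hc] at this
        rw [pvCands_shift c (PySem.Str.lower c) rest (rest.map PySem.Str.lower) 0 data
              (fun kv hkv => ⟨hnoexact kv hkv, hnolower kv hkv⟩)]
        have hsh := foldl_upd_shift (pvCands rest (rest.map PySem.Str.lower) 0 data) none
        simp only [Option.map_none] at hsh
        rw [hsh, ih]
        simp only [Option.bind_none]
        cases List.foldl pvUpd none (pvCands rest (rest.map PySem.Str.lower) 0 data) <;>
          simp [pvShift]

-- ===== VERDICT (by name: the statement is the Claim_ definition above) =====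
theorem mapear_campo_spec : Claim_equal_mapear_campo := by
  intro data campo_sistema _
  unfold Spec_mapear_campo mapear_campo mapear_campo_alt
  simp only [scanB_eq_foldl]
  exact goA_eq_min data _
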